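-- pv_equiv track=rewrite | github.com/Mewzok/python-exercises | day29_exercise.py | purchase_summary
-- ===== SOURCE A (Python) =====
-- def purchase_summary(purchases):
--     users = {}
--
--     for user, purchase in purchases:
--         if purchase is not None and purchase > 0:
--             users.setdefault(user, {
--                 "total_spent": 0, "purchase_count": 0
--             })
--             users[user]["total_spent"] += purchase
--             users[user]["purchase_count"] += 1
--
--     return users
-- ===== SOURCE B (Python) =====
-- def purchase_summary(purchases):
--     # Pass 1: group each user's valid purchase amounts, key order by first appearance.
--     groups = {}
--     for user, purchase in purchases:
--         if purchase is not None and purchase > 0: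
--             groups.setdefault(user, []).append(purchase)
--     # Pass 2: reduce each group to its summary.
--     return {user: {"total_spent": sum(amounts), "purchase_count": len(amounts)}
--             for user, amounts in groups.items()}
-- ===== Notes on version B (the rewrite author's own statement) =====
-- stated objective: alternative
-- what changed: Replaces A's streaming per-user accumulation of two running counters with an index-then-reduce decomposition: one pass groups each user's valid purchase amounts into a list, then a second pass maps each group to {total_spent: sum, purchase_count: len}.
import Mathlib
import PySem

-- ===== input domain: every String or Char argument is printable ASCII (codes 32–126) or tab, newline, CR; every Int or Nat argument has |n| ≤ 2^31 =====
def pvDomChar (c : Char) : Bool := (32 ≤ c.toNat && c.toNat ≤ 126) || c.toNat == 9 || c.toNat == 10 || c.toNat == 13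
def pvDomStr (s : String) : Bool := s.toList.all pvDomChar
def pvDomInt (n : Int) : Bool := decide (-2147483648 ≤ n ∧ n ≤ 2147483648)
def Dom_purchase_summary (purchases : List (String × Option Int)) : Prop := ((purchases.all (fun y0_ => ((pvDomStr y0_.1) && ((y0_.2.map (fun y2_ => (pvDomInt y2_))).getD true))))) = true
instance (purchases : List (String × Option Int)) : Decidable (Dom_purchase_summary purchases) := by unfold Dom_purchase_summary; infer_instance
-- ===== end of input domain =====

-- B replaces A's streaming two-counter accumulation by a group-then-reduce decomposition (alternative, same cost).

-- ===== PORT A =====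
-- A's loop body; `users[user][...] += v` is ported as getD (the key is present after setdefault,
-- so getD with a default equals Python's KeyError-raising lookup there) followed by insert.
def pvStepA (users : PySem.Dict String (PySem.Dict String Int)) (x : String × Option Int) :
    PySem.Dict String (PySem.Dict String Int) :=
  match x.2 with
  | none => users
  | some p =>
    if p > 0 then
      let users1 := users.setdefault x.1 (PySem.Dict.ofList [("total_spent", 0), ("purchase_count", 0)])
      let inner1 := users1.getD x.1 PySem.Dict.empty
      let users2 := users1.insert x.1 (inner1.insert "total_spent" (inner1.getD "total_spent" 0 + p))
      let inner2 := users2.getD x.1 PySem.Dict.empty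
      users2.insert x.1 (inner2.insert "purchase_count" (inner2.getD "purchase_count" 0 + 1))
    else users

def purchase_summary (purchases : List (String × Option Int)) : List (String × List (String × Int)) :=
  ((purchases.foldl pvStepA PySem.Dict.empty).items).map (fun kv => (kv.1, kv.2.items))

-- ===== PORT B =====
-- pass 1: groups.setdefault(user, []).append(purchase)  ==  groups[user] = groups.get(user, []) ++ [purchase]
def pvStepB (groups : PySem.Dict String (List Int)) (x : String × Option Int) :
    PySem.Dict String (List Int) :=
  match x.2 with
  | none => groups
  | some p => if p > 0 then groups.modify x.1 [] (fun l => l ++ [p]) else groups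

def purchase_summary_alt (purchases : List (String × Option Int)) : List (String × List (String × Int)) :=
  ((purchases.foldl pvStepB PySem.Dict.empty).items).map
    (fun kv => (kv.1, [("total_spent", kv.2.sum), ("purchase_count", (kv.2.length : Int))]))

-- ===== PRECONDITION & SPEC =====
def Spec_purchase_summary (purchases : List (String × Option Int)) (out : List (String × List (String × Int))) : Prop := out = purchase_summary_alt purchases
instance (purchases : List (String × Option Int)) (out : List (String × List (String × Int))) : Decidable (Spec_purchase_summary purchases out) := by unfold Spec_purchase_summary; infer_instance

-- ===== CLAIM (what is proved, stated in full; the proofs are below) =====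
def Claim_equal_purchase_summary : Prop := ∀ (purchases : List (String × Option Int)), Dom_purchase_summary purchases → Spec_purchase_summary purchases (purchase_summary purchases)

-- ===== LEMMAS AND PROOFS =====

/-- The summary dict A keeps for a user whose valid purchases are `l`. -/
def pvInner (l : List Int) : PySem.Dict String Int :=
  PySem.Dict.mk [("total_spent", l.sum), ("purchase_count", (l.length : Int))]

/-- Map B's grouping state to A's accumulator state. -/
def pvMapD (g : PySem.Dict String (List Int)) : PySem.Dict String (PySem.Dict String Int) :=
  PySem.Dict.mk (g.items.map (fun kv => (kv.1, pvInner kv.2)))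

theorem pvMapD_contains (g : PySem.Dict String (List Int)) (u : String) :
    (pvMapD g).contains u = g.contains u := by
  simp [pvMapD, PySem.Dict.contains, List.any_map, Function.comp_def]

theorem pvMapD_get? (g : PySem.Dict String (List Int)) (u : String) :
    (pvMapD g).get? u = (g.get? u).map pvInner := by
  simp [pvMapD, PySem.Dict.get?, List.find?_map, Function.comp_def]

theorem pvStep_comm (g : PySem.Dict String (List Int)) (x : String × Option Int) :
    pvStepA (pvMapD g) x = pvMapD (pvStepB g x) := by
  obtain ⟨u, op⟩ := x
  match op with
  | none => rfl
  | some p =>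
    by_cases hp : p > 0
    · simp only [pvStepA, pvStepB, hp, if_pos]
      by_cases hc : g.contains u = true
      · -- user already present
        obtain ⟨l, hl⟩ : ∃ l, g.get? u = some l := by
          rcases h : g.get? u with _ | l
          · exact absurd (PySem.Dict.contains_eq_isSome_get? g u ▸ hc) (by simp [h])
          · exact ⟨l, rfl⟩
        rw [PySem.Dict.setdefault_of_contains _ _ (by rw [pvMapD_contains]; exact hc)]
        have hg1 : (pvMapD g).getD u PySem.Dict.empty = pvInner l := by
          simp [PySem.Dict.getD, pvMapD_get?, hl]
        rw [hg1]
        have h1 : (pvInner l).insert "total_spent" ((pvInner l).getD "total_spent" 0 + p)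
            = PySem.Dict.mk [("total_spent", l.sum + p), ("purchase_count", (l.length : Int))] := by
          simp [pvInner, PySem.Dict.insert, PySem.Dict.contains, PySem.Dict.getD, PySem.Dict.get?]
        rw [h1, PySem.Dict.getD_insert_self]
        have h2 : (PySem.Dict.mk [("total_spent", l.sum + p), ("purchase_count", (l.length : Int))]).insert
              "purchase_count" ((PySem.Dict.mk [("total_spent", l.sum + p), ("purchase_count", (l.length : Int))]).getD "purchase_count" 0 + 1)
            = pvInner (l ++ [p]) := by
          simp [pvInner, PySem.Dict.insert, PySem.Dict.contains, PySem.Dict.getD, PySem.Dict.get?]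
        rw [h2, PySem.Dict.insert_insert_self]
        have hcB : (g.modify u [] (fun l => l ++ [p])).items
            = g.items.map (fun q => if q.1 == u then (u, l ++ [p]) else q) := by
          simp only [PySem.Dict.modify]
          rw [PySem.Dict.items_insert_of_contains _ _ hc]
          simp [PySem.Dict.getD, hl]
        apply PySem.Dict.ext
        rw [PySem.Dict.items_insert_of_contains _ _ (by rw [pvMapD_contains]; exact hc)]
        simp only [pvMapD, hcB, List.map_map]
        apply List.map_congr_left
        intro q _
        by_cases hq : q.1 = u <;> simp [hq]
      · -- fresh user
        rw [PySem.Dict.setdefault_of_not_contains _ _ (by rw [pvMapD_contains]; simpa using hc)]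
        rw [PySem.Dict.getD_insert_self]
        have h1 : (PySem.Dict.ofList [("total_spent", 0), ("purchase_count", 0)]).insert "total_spent"
              ((PySem.Dict.ofList [("total_spent", 0), ("purchase_count", 0)]).getD "total_spent" 0 + p)
            = PySem.Dict.mk [("total_spent", p), ("purchase_count", 0)] := by
          simp [PySem.Dict.ofList, PySem.Dict.insert, PySem.Dict.contains, PySem.Dict.getD,
            PySem.Dict.get?, PySem.Dict.empty, PySem.Dict.update]
        rw [h1, PySem.Dict.insert_insert_self, PySem.Dict.getD_insert_self]
        have h2 : (PySem.Dict.mk [("total_spent", p), ("purchase_count", 0)]).insert "purchase_count"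
              ((PySem.Dict.mk [("total_spent", p), ("purchase_count", 0)]).getD "purchase_count" 0 + 1)
            = pvInner [p] := by
          simp [pvInner, PySem.Dict.insert, PySem.Dict.contains, PySem.Dict.getD, PySem.Dict.get?]
        rw [h2, PySem.Dict.insert_insert_self]
        have hB : g.modify u [] (fun l => l ++ [p]) = g.insert u [p] := by
          simp only [PySem.Dict.modify]
          rw [PySem.Dict.getD_of_not_contains _ _ (by simpa using hc)]
          simp
        apply PySem.Dict.ext
        rw [PySem.Dict.items_insert_of_not_contains _ _ (by rw [pvMapD_contains]; simpa using hc)]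
        rw [hB]
        simp only [pvMapD]
        rw [PySem.Dict.items_insert_of_not_contains _ _ (by simpa using hc)]
        simp
    · simp [pvStepA, pvStepB, hp]

theorem pvFold_comm (xs : List (String × Option Int)) (g : PySem.Dict String (List Int)) :
    xs.foldl pvStepA (pvMapD g) = pvMapD (xs.foldl pvStepB g) := by
  induction xs generalizing g with
  | nil => rfl
  | cons x xs ih => simp only [List.foldl_cons, pvStep_comm, ih]

-- ===== VERDICT (by name: the statement is the Claim_ definition above) =====
theorem purchase_summary_spec : Claim_equal_purchase_summary := by
  intro purchases _
  show purchase_summary purchases = purchase_summary_alt purchases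
  unfold purchase_summary purchase_summary_alt
  have h0 : (PySem.Dict.empty : PySem.Dict String (PySem.Dict String Int)) = pvMapD PySem.Dict.empty := rfl
  rw [h0, pvFold_comm]
  simp [pvMapD, List.map_map, Function.comp_def, pvInner]
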